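-- pv_equiv track=rewrite | github.com/nehamaity/cassidoo-interview-questions | LongestStreak.py | find_longest_streak
-- ===== SOURCE A (Python) =====
-- def find_longest_streak(array, goal):
--     streak = 0
--     for a in array:
--         if a:
--             streak += 1
--         else:
--             streak = 0
--
--     if streak >= goal:
--         return streak
--
--     return 0
-- ===== SOURCE B (Python) =====
-- def find_longest_streak(array, goal):
--     streak = 0
--     for a in reversed(array):
--         if not a:
--             break
--         streak += 1
--     return streak if streak >= goal else 0
-- ===== Notes on version B (the rewrite author's own statement) =====
-- stated objective: alternative
-- what changed: Replaces the full forward scan with reset-on-falsy by a backward scan over reversed(array) counting the trailing truthy suffix and breaking at the first falsy element.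
import Mathlib
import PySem

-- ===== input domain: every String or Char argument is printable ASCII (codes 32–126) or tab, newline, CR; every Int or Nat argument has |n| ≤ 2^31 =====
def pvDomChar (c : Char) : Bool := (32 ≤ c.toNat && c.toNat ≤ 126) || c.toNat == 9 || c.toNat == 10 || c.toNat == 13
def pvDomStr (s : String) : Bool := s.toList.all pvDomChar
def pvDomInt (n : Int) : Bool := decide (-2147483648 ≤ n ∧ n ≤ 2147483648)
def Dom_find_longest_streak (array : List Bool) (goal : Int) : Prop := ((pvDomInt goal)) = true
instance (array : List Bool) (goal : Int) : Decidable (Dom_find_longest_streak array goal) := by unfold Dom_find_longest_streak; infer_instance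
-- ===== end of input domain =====

-- B scans the array backwards and stops at the first falsy element (alternative decomposition; same result).

-- ===== PORT A =====
def find_longest_streak (array : List Bool) (goal : Int) : Int :=
  let streak := array.foldl (fun s a => if a then s + 1 else 0) (0 : Int)
  if streak ≥ goal then streak else 0

-- ===== PORT B =====
-- count of leading truthy elements, stopping at the first falsy (B's reversed-loop-with-break)
def pvSuffixCount : List Bool → Int
  | [] => 0
  | a :: rest => if a then pvSuffixCount rest + 1 else 0

def find_longest_streak_alt (array : List Bool) (goal : Int) : Int :=
  let streak := pvSuffixCount array.reverse
  if streak ≥ goal then streak else 0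

-- ===== PRECONDITION & SPEC =====
def Spec_find_longest_streak (array : List Bool) (goal : Int) (out : Int) : Prop := out = find_longest_streak_alt array goal
instance (array : List Bool) (goal : Int) (out : Int) : Decidable (Spec_find_longest_streak array goal out) := by unfold Spec_find_longest_streak; infer_instance

-- ===== CLAIM (what is proved, stated in full; the proofs are below) =====
def Claim_equal_find_longest_streak : Prop := ∀ (array : List Bool) (goal : Int), Dom_find_longest_streak array goal → Spec_find_longest_streak array goal (find_longest_streak array goal)

-- ===== LEMMAS AND PROOFS =====
theorem pv_foldl_eq_suffixCount (l : List Bool) :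
    l.foldl (fun s a => if a then s + 1 else 0) (0 : Int) = pvSuffixCount l.reverse := by
  induction l using List.reverseRecOn with
  | nil => simp [pvSuffixCount]
  | append_singleton l a ih =>
    simp [List.foldl_append, pvSuffixCount, ih]

-- ===== VERDICT (by name: the statement is the Claim_ definition above) =====
theorem find_longest_streak_spec : Claim_equal_find_longest_streak := by
  intro array goal _
  unfold Spec_find_longest_streak find_longest_streak find_longest_streak_alt
  simp [pv_foldl_eq_suffixCount]
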